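-- pv_equiv track=rewrite | github.com/kwola0/typoscanning | domain_generator.py | generate_bitsquatting_domains
-- ===== SOURCE A (Python) =====
-- def generate_bitsquatting_domains(main_name: str, base_tld: str) -> set:
--     typo_domains = set()
--
--     for i, char in enumerate(main_name):
--         ascii_value = ord(char)
--         for bit in range(8):
--             flipped_value = ascii_value ^ (1 << bit)
--             if 32 <= flipped_value <= 126:
--                 flipped_char = chr(flipped_value)
--                 new_domain = (main_name[:i] + flipped_char + main_name[i + 1:]).lower() + '.' + base_tld
--                 typo_domains.add(new_domain)
--
--     return typo_domains
-- ===== SOURCE B (Python) =====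
-- def generate_bitsquatting_domains(main_name: str, base_tld: str) -> set:
--     cands = []
--     prefix, rest = '', main_name
--     while rest:
--         ch, rest = rest[0], rest[1:]
--         o = ord(ch)
--         cands += [(prefix + chr(o ^ (1 << b)) + rest).lower() + '.' + base_tld
--                   for b in range(8) if 32 <= (o ^ (1 << b)) <= 126]
--         prefix = prefix + ch
--     return set(cands)
-- ===== Notes on version B (the rewrite author's own statement) =====
-- stated objective: alternative
-- what changed: B walks a prefix/suffix zipper over the name (no enumerate, no index slicing), collects all candidate domains into a plain list with duplicates, and deduplicates once with a single set() at the end, instead of A's enumerate+slice nested scan that inserts into a growing set element by element.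
import Mathlib
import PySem

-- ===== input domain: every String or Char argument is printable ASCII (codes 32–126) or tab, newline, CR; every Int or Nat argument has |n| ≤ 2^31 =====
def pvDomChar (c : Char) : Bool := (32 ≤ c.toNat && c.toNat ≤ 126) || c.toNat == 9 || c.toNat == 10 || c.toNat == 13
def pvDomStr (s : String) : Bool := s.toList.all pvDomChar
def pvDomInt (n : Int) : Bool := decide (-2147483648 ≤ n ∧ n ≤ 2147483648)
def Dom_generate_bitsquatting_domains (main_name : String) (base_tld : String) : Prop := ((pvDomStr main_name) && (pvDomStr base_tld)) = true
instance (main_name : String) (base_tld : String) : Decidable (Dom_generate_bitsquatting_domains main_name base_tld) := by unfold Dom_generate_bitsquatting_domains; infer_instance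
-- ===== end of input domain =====

-- B replaces A's enumerate+slice scan with incremental set insertion by a prefix/suffix
-- zipper walk that builds the full candidate list and deduplicates once at the end
-- (objective: alternative decomposition; same results).

-- ===== PORT A =====
-- assembles one variant domain: name with position i replaced by fc, lowered, '.' tld
def pvAssemble (cs : List Char) (tld : List Char) (i : Int) (fc : Char) : String :=
  String.ofList (PySem.Chars.lower
      (PySem.List.slice cs none (some i) ++ fc :: PySem.List.slice cs (some (i + 1)) none)
    ++ '.' :: tld)

def generate_bitsquatting_domains (main_name : String) (base_tld : String) : List String :=
  let cs := main_name.toList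
  (PySem.List.enumerate cs).foldl (fun td p =>
      let ascii_value : Int := (p.2.toNat : Int)
      (PySem.List.pyRange 0 8 1).foldl (fun td bit =>
          let flipped_value := PySem.Int.bxor ascii_value ((1 : Int) <<< bit.toNat)
          if 32 ≤ flipped_value ∧ flipped_value ≤ 126 then
            PySem.Set.add td (pvAssemble cs base_tld.toList p.1 (Char.ofNat flipped_value.toNat))
          else td)
        td)
    PySem.Set.empty

-- ===== PORT B =====
-- the while loop of Source B: 'prefix' and 'rest' are the zipper, 'cands' the candidate list
def pvVariantsLoop (tld : List Char) (cands : List String) (pre rest : List Char) : List String :=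
  match rest with
  | [] => cands
  | ch :: tail =>
      let o : Int := (ch.toNat : Int)
      pvVariantsLoop tld
        (cands ++ (PySem.List.pyRange 0 8 1).foldl (fun here b =>
            let v := PySem.Int.bxor o ((1 : Int) <<< b.toNat)
            if 32 ≤ v ∧ v ≤ 126 then
              here ++ [String.ofList (PySem.Chars.lower (pre ++ Char.ofNat v.toNat :: tail) ++ '.' :: tld)]
            else here) [])
        (pre ++ [ch]) tail

def generate_bitsquatting_domains_alt (main_name : String) (base_tld : String) : List String :=
  PySem.Set.ofList (pvVariantsLoop base_tld.toList [] [] main_name.toList)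

-- ===== PRECONDITION & SPEC =====
def Spec_generate_bitsquatting_domains (main_name : String) (base_tld : String) (out : List String) : Prop := out = generate_bitsquatting_domains_alt main_name base_tld
instance (main_name : String) (base_tld : String) (out : List String) : Decidable (Spec_generate_bitsquatting_domains main_name base_tld out) := by unfold Spec_generate_bitsquatting_domains; infer_instance

-- ===== CLAIM (what is proved, stated in full; the proofs are below) =====
def Claim_equal_generate_bitsquatting_domains : Prop := ∀ (main_name : String) (base_tld : String), Dom_generate_bitsquatting_domains main_name base_tld → Spec_generate_bitsquatting_domains main_name base_tld (generate_bitsquatting_domains main_name base_tld)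

-- ===== LEMMAS AND PROOFS =====

-- the per-position candidate list of A, as a list (proof helper)
def pvInner (cs tld : List Char) (p : Int × Char) : List String :=
  (PySem.List.pyRange 0 8 1).foldl (fun out bit =>
      let v := PySem.Int.bxor ((p.2.toNat : Int)) ((1 : Int) <<< bit.toNat)
      if 32 ≤ v ∧ v ≤ 126 then out ++ [pvAssemble cs tld p.1 (Char.ofNat v.toNat)] else out)
    []

-- an append-if fold distributes over a prefix of its accumulator
theorem pv_appendIf_shift {α β : Type} (l : List α) (p : α → Prop) [DecidablePred p]
    (f : α → β) : ∀ (a b : List β),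
    l.foldl (fun out x => if p x then out ++ [f x] else out) (a ++ b) =
      a ++ l.foldl (fun out x => if p x then out ++ [f x] else out) b := by
  induction l with
  | nil => simp
  | cons x xs ih =>
    intro a b
    simp only [List.foldl_cons]
    by_cases hx : p x
    · rw [if_pos hx, if_pos hx, List.append_assoc, ih]
    · rw [if_neg hx, if_neg hx, ih]

-- an if-guarded Set.add loop over l, started from ofList acc, is ofList of acc ++ the append-if list
theorem pv_fold_if_add (l : List Int) (p : Int → Prop) [DecidablePred p]
    (f : Int → String) : ∀ (acc : List String),
    l.foldl (fun td b => if p b then PySem.Set.add td (f b) else td) (PySem.Set.ofList acc) =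
      PySem.Set.ofList (acc ++ l.foldl (fun out b => if p b then out ++ [f b] else out) []) := by
  induction l with
  | nil => simp
  | cons x xs ih =>
    intro acc
    simp only [List.foldl_cons]
    by_cases hx : p x
    · rw [if_pos hx, if_pos hx, ← PySem.Set.ofList_append_singleton, ih (acc ++ [f x]),
        List.nil_append, show [f x] = [f x] ++ [] by simp, pv_appendIf_shift, List.append_nil,
        List.append_assoc]
    · rw [if_neg hx, if_neg hx, ih acc]

-- folding A's outer body over any enumerate list, from ofList acc, flat-maps pvInner
theorem pv_outer_fold (cs tld : List Char) (l : List (Int × Char)) :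
    ∀ (acc : List String),
    l.foldl (fun td p =>
        (PySem.List.pyRange 0 8 1).foldl (fun td bit =>
            let v := PySem.Int.bxor ((p.2.toNat : Int)) ((1 : Int) <<< bit.toNat)
            if 32 ≤ v ∧ v ≤ 126 then
              PySem.Set.add td (pvAssemble cs tld p.1 (Char.ofNat v.toNat))
            else td)
          td)
      (PySem.Set.ofList acc) =
    PySem.Set.ofList (acc ++ l.flatMap (pvInner cs tld)) := by
  induction l with
  | nil => simp
  | cons q l ih =>
    intro acc
    simp only [List.foldl_cons]
    rw [pv_fold_if_add]
    rw [List.flatMap_cons, ← List.append_assoc]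
    exact ih (acc ++ pvInner cs tld q)

-- replacing position |pre| of pre++ch::tail is the zipper's pre ++ fc :: tail build
theorem pv_assemble_eq (pre tail tld : List Char) (ch fc : Char) :
    pvAssemble (pre ++ ch :: tail) tld ((pre.length : Nat) : Int) fc =
      String.ofList (PySem.Chars.lower (pre ++ fc :: tail) ++ '.' :: tld) := by
  unfold pvAssemble
  rw [PySem.List.slice_to_natCast,
    show ((pre.length : Int) + 1) = (((pre.length + 1 : Nat)) : Int) by push_cast; ring,
    PySem.List.slice_from_natCast,
    List.take_left,
    show pre ++ ch :: tail = (pre ++ [ch]) ++ tail by simp,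
    show pre.length + 1 = (pre ++ [ch]).length by simp,
    List.drop_left]

-- B's zipper loop produces exactly the flat-mapped stream of A's per-position lists
theorem pv_zipper_stream (tld : List Char) : ∀ (rest pre : List Char) (cands : List String),
    pvVariantsLoop tld cands pre rest =
      cands ++ (PySem.List.enumerate rest (pre.length : Int)).flatMap
        (pvInner (pre ++ rest) tld) := by
  intro rest
  induction rest with
  | nil => intro pre cands; simp [pvVariantsLoop]
  | cons ch tail ih =>
    intro pre cands
    rw [pvVariantsLoop, PySem.List.enumerate_cons, List.flatMap_cons, ih]
    have hcs : (pre ++ [ch]) ++ tail = pre ++ ch :: tail := by simp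
    have hlen : (((pre ++ [ch]).length : Nat) : Int) = (pre.length : Int) + 1 := by
      simp
    rw [hcs, hlen, List.append_assoc]
    congr 2
    show (PySem.List.pyRange 0 8 1).foldl _ [] = pvInner (pre ++ ch :: tail) tld ((pre.length : Int), ch)
    unfold pvInner
    apply PySem.List.foldl_congr_mem
    intro out b _
    dsimp only
    split_ifs
    · rw [pv_assemble_eq]
    · rfl

-- ===== VERDICT (by name: the statement is the Claim_ definition above) =====
theorem generate_bitsquatting_domains_spec : Claim_equal_generate_bitsquatting_domains := by
  intro main_name base_tld _
  unfold Spec_generate_bitsquatting_domains generate_bitsquatting_domains generate_bitsquatting_domains_alt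
  rw [pv_zipper_stream]
  have h := pv_outer_fold main_name.toList base_tld.toList (PySem.List.enumerate main_name.toList) []
  simpa using h
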